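-- pv_equiv track=rewrite | github.com/Polymathera/colony | python/colony/samples/code_analysis/compliance/capabilities.py | _licenses_compatible
-- ===== SOURCE A (Python) =====
-- def _licenses_compatible(license1: str, license2: str) -> bool:
--     """Check if two licenses are compatible.
--
--     Args:
--         license1: First license
--         license2: Second license
--
--     Returns:
--         True if compatible
--     """
--     # Simplified compatibility matrix
--     incompatible_pairs = [
--         ("GPL", "Apache"),
--         ("GPL", "MIT"),  # Only if distributed together
--         ("AGPL", "proprietary"),
--         ("GPL", "proprietary")
--     ]
--
--     for l1, l2 in incompatible_pairs:
--         if (l1.lower() in license1.lower() and l2.lower() in license2.lower()) or \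
--            (l2.lower() in license1.lower() and l1.lower() in license2.lower()):
--             return False
--
--     return True
-- ===== SOURCE B (Python) =====
-- # Closed-form rule derived from the matrix: since "agpl" contains "gpl" as a
-- # substring, the (AGPL, proprietary) edge is subsumed by (GPL, proprietary), so
-- # the whole matrix collapses to: incompatible iff one side mentions gpl and the
-- # other mentions apache, mit or proprietary.  No pair list, no edge loop.
-- def _licenses_compatible(license1: str, license2: str) -> bool:
--     s1 = license1.lower()
--     s2 = license2.lower()
--     g1 = "gpl" in s1
--     g2 = "gpl" in s2
--     o1 = "apache" in s1 or "mit" in s1 or "proprietary" in s1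
--     o2 = "apache" in s2 or "mit" in s2 or "proprietary" in s2
--     return not ((g1 and o2) or (g2 and o1))
-- ===== Notes on version B (the rewrite author's own statement) =====
-- stated objective: simpler
-- what changed: B replaces the incompatible-pair list and its symmetric per-edge substring loop with a derived closed-form boolean rule: because 'agpl' contains 'gpl' as a substring the AGPL/proprietary edge is subsumed, and the matrix collapses to 'one side mentions gpl and the other mentions apache/mit/proprietary'.
import Mathlib
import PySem

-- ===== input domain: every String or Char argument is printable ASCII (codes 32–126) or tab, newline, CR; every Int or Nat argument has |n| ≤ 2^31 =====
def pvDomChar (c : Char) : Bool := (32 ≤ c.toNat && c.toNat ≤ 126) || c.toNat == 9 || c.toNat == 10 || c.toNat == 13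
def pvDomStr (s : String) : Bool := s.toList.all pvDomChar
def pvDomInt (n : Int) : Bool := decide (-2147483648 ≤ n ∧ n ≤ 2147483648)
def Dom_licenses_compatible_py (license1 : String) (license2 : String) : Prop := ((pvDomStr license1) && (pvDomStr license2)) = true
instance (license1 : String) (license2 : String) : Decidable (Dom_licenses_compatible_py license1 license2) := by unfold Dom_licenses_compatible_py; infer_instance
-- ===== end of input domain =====

-- B replaces the pair list and its edge loop with a derived closed-form boolean rule
-- (the AGPL/proprietary edge is subsumed because "agpl" contains "gpl"); objective: simpler.

-- ===== PORT A =====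
-- the loop 'for l1, l2 in incompatible_pairs: if … return False' with early return
def aLoop (license1 : String) (license2 : String) : List (String × String) → Bool
  | [] => true
  | (l1, l2) :: rest =>
    if ((PySem.Str.isIn (PySem.Str.lower l1) (PySem.Str.lower license1) &&
         PySem.Str.isIn (PySem.Str.lower l2) (PySem.Str.lower license2)) ||
        (PySem.Str.isIn (PySem.Str.lower l2) (PySem.Str.lower license1) &&
         PySem.Str.isIn (PySem.Str.lower l1) (PySem.Str.lower license2))) then
      false
    else
      aLoop license1 license2 rest

def licenses_compatible_py (license1 : String) (license2 : String) : Bool :=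
  aLoop license1 license2
    [("GPL", "Apache"), ("GPL", "MIT"), ("AGPL", "proprietary"), ("GPL", "proprietary")]

-- ===== PORT B =====
def licenses_compatible_py_alt (license1 : String) (license2 : String) : Bool :=
  let s1 := PySem.Str.lower license1
  let s2 := PySem.Str.lower license2
  let g1 := PySem.Str.isIn "gpl" s1
  let g2 := PySem.Str.isIn "gpl" s2
  let o1 := PySem.Str.isIn "apache" s1 || PySem.Str.isIn "mit" s1 || PySem.Str.isIn "proprietary" s1
  let o2 := PySem.Str.isIn "apache" s2 || PySem.Str.isIn "mit" s2 || PySem.Str.isIn "proprietary" s2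
  !((g1 && o2) || (g2 && o1))

-- ===== PRECONDITION & SPEC =====
def Spec_licenses_compatible_py (license1 : String) (license2 : String) (out : Bool) : Prop := out = licenses_compatible_py_alt license1 license2
instance (license1 : String) (license2 : String) (out : Bool) : Decidable (Spec_licenses_compatible_py license1 license2 out) := by unfold Spec_licenses_compatible_py; infer_instance

-- ===== CLAIM =====
def Claim_equal_licenses_compatible_py : Prop := ∀ (license1 : String) (license2 : String), Dom_licenses_compatible_py license1 license2 → Spec_licenses_compatible_py license1 license2 (licenses_compatible_py license1 license2)

-- ===== LEMMAS AND PROOFS =====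
theorem lower_GPL : PySem.Str.lower "GPL" = "gpl" := by decide
theorem lower_Apache : PySem.Str.lower "Apache" = "apache" := by decide
theorem lower_MIT : PySem.Str.lower "MIT" = "mit" := by decide
theorem lower_AGPL : PySem.Str.lower "AGPL" = "agpl" := by decide
theorem lower_proprietary : PySem.Str.lower "proprietary" = "proprietary" := by decide

-- the key subsumption: a string containing "agpl" also contains "gpl"
theorem gpl_of_agpl (s : String) (h : PySem.Str.isIn "agpl" s = true) :
    PySem.Str.isIn "gpl" s = true := by
  rw [PySem.Str.isIn_iff_infix] at h ⊢
  exact List.IsInfix.trans (l₂ := "agpl".toList) (by decide) h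

-- the boolean truth table behind both programs, under the subsumption hypotheses
theorem table (g1 g2 a1 a2 m1 m2 p1 p2 q1 q2 : Bool)
    (h1 : p1 = true → g1 = true) (h2 : p2 = true → g2 = true) :
    (if ((g1 && a2) || (a1 && g2)) then false
     else if ((g1 && m2) || (m1 && g2)) then false
     else if ((p1 && q2) || (q1 && p2)) then false
     else if ((g1 && q2) || (q1 && g2)) then false
     else true)
    = !((g1 && (a2 || m2 || q2)) || (g2 && (a1 || m1 || q1))) := by
  revert h1 h2
  cases g1 <;> cases g2 <;> cases a1 <;> cases a2 <;> cases m1 <;> cases m2 <;>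
  cases p1 <;> cases p2 <;> cases q1 <;> cases q2 <;> decide

theorem both_eq (license1 license2 : String) :
    licenses_compatible_py license1 license2 = licenses_compatible_py_alt license1 license2 := by
  simp only [licenses_compatible_py, licenses_compatible_py_alt, aLoop,
    lower_GPL, lower_Apache, lower_MIT, lower_AGPL, lower_proprietary]
  exact table _ _ _ _ _ _ _ _ _ _
    (gpl_of_agpl (PySem.Str.lower license1)) (gpl_of_agpl (PySem.Str.lower license2))

-- ===== VERDICT =====
theorem licenses_compatible_py_spec : Claim_equal_licenses_compatible_py := by
  intro license1 license2 _
  exact both_eq license1 license2
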